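-- pv_equiv track=rewrite | github.com/BZLOM4JOPbI/Amadeus-Courses | Amadeus_project/main_pages/services.py | is_password_contains_upper_lower_letters
-- ===== SOURCE A (Python) =====
-- def is_password_contains_upper_lower_letters(password: str) -> bool:
--
--     test_arg = [0, 0]
--
--     for char in set(password):
--         if 'a' <= char.lower() <= 'z':
--             if char.isupper():
--                 test_arg[1] = 1
--             else:
--                 test_arg[0] = 1
--
--     return sum(test_arg) == 2
-- ===== SOURCE B (Python) =====
-- def is_password_contains_upper_lower_letters(password: str) -> bool:
--     # Case-transform comparison: the string changes under .lower() iff it has an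
--     # uppercase letter, and under .upper() iff it has a lowercase letter.
--     return password != password.lower() and password != password.upper()
-- ===== Notes on version B (the rewrite author's own statement) =====
-- stated objective: idiomatic
-- what changed: Replaces the per-character flag loop over set(password) with two whole-string case transforms compared to the original: the string differs from its .lower() iff it has an upper-case letter and from its .upper() iff it has a lower-case letter; no letter-range predicate or flags at all.
import Mathlib
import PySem

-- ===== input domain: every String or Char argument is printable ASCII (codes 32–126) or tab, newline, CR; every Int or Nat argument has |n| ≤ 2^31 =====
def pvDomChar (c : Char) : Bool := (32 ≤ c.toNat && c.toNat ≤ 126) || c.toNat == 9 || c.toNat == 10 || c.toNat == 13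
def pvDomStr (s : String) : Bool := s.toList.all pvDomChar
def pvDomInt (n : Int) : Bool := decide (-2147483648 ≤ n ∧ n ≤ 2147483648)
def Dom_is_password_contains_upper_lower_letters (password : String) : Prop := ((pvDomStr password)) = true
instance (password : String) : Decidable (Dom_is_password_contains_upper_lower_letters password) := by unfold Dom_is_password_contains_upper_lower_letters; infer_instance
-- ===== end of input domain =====

-- B replaces A's set-build + flag-array loop by comparing the string with its .lower()/.upper() transforms (idiomatic; equivalence proved on the ASCII domain).


-- ===== PORT A =====
-- test_arg = [0, 0]; for char in set(password): …; return sum(test_arg) == 2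
-- (the flag result is order-independent, so consuming the PySem.Set by foldl is exact)
def is_password_contains_upper_lower_letters (password : String) : Bool :=
  let test_arg : Int × Int :=
    (PySem.Set.ofList password.toList).foldl
      (fun (t : Int × Int) char =>
        if 'a' ≤ PySem.Chars.lowerChar char ∧ PySem.Chars.lowerChar char ≤ 'z' then
          if PySem.Chars.isupper char then (t.1, 1) else (1, t.2)
        else t)
      (0, 0)
  decide (test_arg.1 + test_arg.2 = 2)

-- ===== PORT B =====
-- return password != password.lower() and password != password.upper()
def is_password_contains_upper_lower_letters_alt (password : String) : Bool :=
  decide (password ≠ PySem.Str.lower password) && decide (password ≠ PySem.Str.upper password)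

-- ===== PRECONDITION & SPEC =====
def Spec_is_password_contains_upper_lower_letters (password : String) (out : Bool) : Prop := out = is_password_contains_upper_lower_letters_alt password
instance (password : String) (out : Bool) : Decidable (Spec_is_password_contains_upper_lower_letters password out) := by unfold Spec_is_password_contains_upper_lower_letters; infer_instance

-- ===== CLAIM (what is proved, stated in full; the proofs are below) =====
def Claim_equal_is_password_contains_upper_lower_letters : Prop := ∀ (password : String), Dom_is_password_contains_upper_lower_letters password → Spec_is_password_contains_upper_lower_letters password (is_password_contains_upper_lower_letters password)

-- ===== LEMMAS AND PROOFS =====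

/-- A's flag loop computes, over any char list, exactly the two existence flags. -/
lemma pv_flags (l : List Char) (a b : Int) :
    l.foldl
      (fun (t : Int × Int) char =>
        if 'a' ≤ PySem.Chars.lowerChar char ∧ PySem.Chars.lowerChar char ≤ 'z' then
          if PySem.Chars.isupper char then (t.1, 1) else (1, t.2)
        else t)
      (a, b)
    = ((if l.any (fun c => decide ('a' ≤ PySem.Chars.lowerChar c ∧ PySem.Chars.lowerChar c ≤ 'z') && !PySem.Chars.isupper c) then 1 else a),
       (if l.any (fun c => decide ('a' ≤ PySem.Chars.lowerChar c ∧ PySem.Chars.lowerChar c ≤ 'z') && PySem.Chars.isupper c) then 1 else b)) := by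
  induction l generalizing a b with
  | nil => simp
  | cons c l ih =>
    by_cases hl : 'a' ≤ PySem.Chars.lowerChar c ∧ PySem.Chars.lowerChar c ≤ 'z' <;>
      by_cases hu : PySem.Chars.isupper c = true <;>
      simp [List.foldl_cons, ih, hl, hu]

/-- any over set(xs) agrees with any over xs (same membership). -/
lemma pv_any_ofList (l : List Char) (p : Char → Bool) :
    (PySem.Set.ofList l).any p = l.any p := by
  cases h : l.any p with
  | true =>
    obtain ⟨x, hx, hp⟩ := List.any_eq_true.mp h
    exact List.any_eq_true.mpr ⟨x, (PySem.Set.mem_ofList l x).mpr hx, hp⟩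
  | false =>
    rw [List.any_eq_false] at h ⊢
    intro x hx
    exact h x ((PySem.Set.mem_ofList l x).mp hx)

/-- Transfer a decidable per-char fact proved over the 127 ASCII codes to any such char. -/
lemma pv_char127 (P : Char → Prop) [DecidablePred P] (h : ∀ n < 127, P (Char.ofNat n))
    (c : Char) (hc : c.toNat < 127) : P c := by
  have := h c.toNat hc
  rwa [Char.ofNat_toNat] at this

/-- On ASCII chars, A's upper-flag predicate is exactly `isupper`. -/
lemma pv_up_pred (c : Char) (hc : c.toNat < 127) :
    (decide ('a' ≤ PySem.Chars.lowerChar c ∧ PySem.Chars.lowerChar c ≤ 'z') && PySem.Chars.isupper c)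
      = PySem.Chars.isupper c :=
  pv_char127 (fun c => (decide ('a' ≤ PySem.Chars.lowerChar c ∧ PySem.Chars.lowerChar c ≤ 'z') && PySem.Chars.isupper c) = PySem.Chars.isupper c)
    (by decide) c hc

/-- On ASCII chars, A's lower-flag predicate is exactly `islower`. -/
lemma pv_low_pred (c : Char) (hc : c.toNat < 127) :
    (decide ('a' ≤ PySem.Chars.lowerChar c ∧ PySem.Chars.lowerChar c ≤ 'z') && !PySem.Chars.isupper c)
      = PySem.Chars.islower c :=
  pv_char127 (fun c => (decide ('a' ≤ PySem.Chars.lowerChar c ∧ PySem.Chars.lowerChar c ≤ 'z') && !PySem.Chars.isupper c) = PySem.Chars.islower c)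
    (by decide) c hc

/-- An ASCII char moves under lowerChar iff it is an upper-case letter. -/
lemma pv_lowerChar_ne (c : Char) (hc : c.toNat < 127) :
    decide (PySem.Chars.lowerChar c ≠ c) = PySem.Chars.isupper c :=
  pv_char127 (fun c => decide (PySem.Chars.lowerChar c ≠ c) = PySem.Chars.isupper c) (by decide) c hc

/-- An ASCII char moves under upperChar iff it is a lower-case letter. -/
lemma pv_upperChar_ne (c : Char) (hc : c.toNat < 127) :
    decide (PySem.Chars.upperChar c ≠ c) = PySem.Chars.islower c :=
  pv_char127 (fun c => decide (PySem.Chars.upperChar c ≠ c) = PySem.Chars.islower c) (by decide) c hc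

/-- map f fixes a list iff it fixes every element. -/
lemma pv_map_eq (l : List Char) (f : Char → Char) :
    (l.map f = l) ↔ ∀ c ∈ l, f c = c := by
  induction l with
  | nil => simp
  | cons c t ih => simp [ih]

/-- s ≠ s.map f  ⟺  some element moves. -/
lemma pv_map_ne (l : List Char) (f : Char → Char) :
    (l.map f ≠ l) ↔ l.any (fun c => decide (f c ≠ c)) = true := by
  rw [Ne, pv_map_eq]
  simp

/-- any is determined by the predicate's values on the members. -/
lemma pv_any_congr {l : List Char} {p q : Char → Bool} (h : ∀ c ∈ l, p c = q c) :
    l.any p = l.any q := by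
  induction l with
  | nil => rfl
  | cons c t ih =>
    simp only [List.any_cons, h c (by simp), ih (fun x hx => h x (by simp [hx]))]

-- ===== VERDICT (by name: the statement is the Claim_ definition above) =====
theorem is_password_contains_upper_lower_letters_spec : Claim_equal_is_password_contains_upper_lower_letters := by
  intro password hdom
  have hD : ∀ c ∈ password.toList, c.toNat < 127 := by
    intro c hc
    have := List.all_eq_true.mp hdom c hc
    simp only [pvDomChar, Bool.or_eq_true, Bool.and_eq_true, decide_eq_true_iff, beq_iff_eq] at this
    omega
  unfold Spec_is_password_contains_upper_lower_letters
  unfold is_password_contains_upper_lower_letters is_password_contains_upper_lower_letters_alt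
  simp only [pv_flags, pv_any_ofList]
  have e1 : password.toList.any
      (fun c => decide ('a' ≤ PySem.Chars.lowerChar c ∧ PySem.Chars.lowerChar c ≤ 'z') && !PySem.Chars.isupper c)
      = password.toList.any (fun c => PySem.Chars.islower c) :=
    pv_any_congr (fun c hc => pv_low_pred c (hD c hc))
  have e2 : password.toList.any
      (fun c => decide ('a' ≤ PySem.Chars.lowerChar c ∧ PySem.Chars.lowerChar c ≤ 'z') && PySem.Chars.isupper c)
      = password.toList.any (fun c => PySem.Chars.isupper c) :=
    pv_any_congr (fun c hc => pv_up_pred c (hD c hc))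
  have hl : (password ≠ PySem.Str.lower password)
      ↔ password.toList.any (fun c => PySem.Chars.isupper c) = true := by
    rw [ne_comm, ← String.toList_inj.ne, PySem.Str.toList_lower, PySem.Chars.lower, pv_map_ne,
        pv_any_congr (fun c hc => pv_lowerChar_ne c (hD c hc))]
  have hu : (password ≠ PySem.Str.upper password)
      ↔ password.toList.any (fun c => PySem.Chars.islower c) = true := by
    rw [ne_comm, ← String.toList_inj.ne, PySem.Str.toList_upper, PySem.Chars.upper, pv_map_ne,
        pv_any_congr (fun c hc => pv_upperChar_ne c (hD c hc))]
  rw [e1, e2]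
  rcases h1 : password.toList.any (fun c => PySem.Chars.islower c) <;>
    rcases h2 : password.toList.any (fun c => PySem.Chars.isupper c) <;>
      simp only [h1, h2, if_true, if_false, Bool.false_eq_true] <;>
      simp only [hl, hu, h1, h2] <;> simp
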